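-- pv_equiv track=rewrite | github.com/scrawlsbenches/Opus-code-test | scripts/ml_collector/config.py | count_redactions
-- ===== SOURCE A (Python) =====
-- def count_redactions(original: str, redacted: str) -> int:
--     """Count how many redactions were made."""
--     if not original or not redacted:
--         return 0
--     # Count occurrences of redaction markers
--     markers = ['<REDACTED>', '<AWS_KEY_REDACTED>', '<PRIVATE_KEY_REDACTED>',
--                '<SSH_KEY_REDACTED>', '<CONNECTION_REDACTED>', '<CREDENTIALS>',
--                '<GITHUB_TOKEN_REDACTED>', '<GITHUB_OAUTH_REDACTED>',
--                '<SLACK_TOKEN_REDACTED>', '<JWT_REDACTED>']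
--     return sum(redacted.count(m) for m in markers)
-- ===== SOURCE B (Python) =====
-- def count_redactions(original: str, redacted: str) -> int:
--     """Count how many redactions were made."""
--     if not original or not redacted:
--         return 0
--     markers = ('<REDACTED>', '<AWS_KEY_REDACTED>', '<PRIVATE_KEY_REDACTED>',
--                '<SSH_KEY_REDACTED>', '<CONNECTION_REDACTED>', '<CREDENTIALS>',
--                '<GITHUB_TOKEN_REDACTED>', '<GITHUB_OAUTH_REDACTED>',
--                '<SLACK_TOKEN_REDACTED>', '<JWT_REDACTED>')
--     total = 0
--     for i in range(len(redacted)):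
--         if redacted.startswith(markers, i):
--             total += 1
--     return total
-- ===== Notes on version B (the rewrite author's own statement) =====
-- stated objective: alternative
-- what changed: Replaces ten separate str.count passes over the string with one left-to-right scan that tests all markers at each position via tuple-startswith; equal because no marker is a prefix of another and markers cannot overlap (each contains '<' only at position 0).
import Mathlib
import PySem

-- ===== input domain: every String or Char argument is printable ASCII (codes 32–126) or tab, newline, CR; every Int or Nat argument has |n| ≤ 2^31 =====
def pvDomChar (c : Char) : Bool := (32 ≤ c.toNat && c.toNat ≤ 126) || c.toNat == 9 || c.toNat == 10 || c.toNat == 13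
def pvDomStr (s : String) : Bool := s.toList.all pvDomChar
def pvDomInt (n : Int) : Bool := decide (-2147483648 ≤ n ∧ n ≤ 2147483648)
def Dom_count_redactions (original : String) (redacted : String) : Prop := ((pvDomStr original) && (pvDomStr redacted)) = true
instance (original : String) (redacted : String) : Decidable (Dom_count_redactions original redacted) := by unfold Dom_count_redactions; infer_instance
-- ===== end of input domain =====

-- B replaces A's ten separate str.count passes by one left-to-right scan testing all markers
-- at each position (tuple-startswith); alternative single-pass structure, same cost class.

-- the shared literal marker list (identical in both Python sources)
def pvMarkers : List String :=
  ["<REDACTED>", "<AWS_KEY_REDACTED>", "<PRIVATE_KEY_REDACTED>",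
   "<SSH_KEY_REDACTED>", "<CONNECTION_REDACTED>", "<CREDENTIALS>",
   "<GITHUB_TOKEN_REDACTED>", "<GITHUB_OAUTH_REDACTED>",
   "<SLACK_TOKEN_REDACTED>", "<JWT_REDACTED>"]

-- ===== PORT A =====
-- sum(redacted.count(m) for m in markers), guarded by the two emptiness tests
def count_redactions (original : String) (redacted : String) : Int :=
  if PySem.Str.len original = 0 ∨ PySem.Str.len redacted = 0 then 0
  else (pvMarkers.map (fun m => (PySem.Str.count redacted m : Int))).sum

-- ===== PORT B =====
-- for i in range(len(redacted)): if redacted.startswith(markers, i): total += 1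
-- (s.startswith(m, i) for 0 ≤ i is 'm is a prefix of s[i:]'; ported via slice + startswith)
def count_redactions_alt (original : String) (redacted : String) : Int :=
  if PySem.Str.len original = 0 ∨ PySem.Str.len redacted = 0 then 0
  else
    (PySem.List.pyRange 0 (PySem.Str.len redacted)).foldl
      (fun total i =>
        if pvMarkers.any (fun m =>
            PySem.Chars.startswith (PySem.List.slice redacted.toList (some i) none) m.toList)
        then total + 1 else total) 0

-- ===== PRECONDITION & SPEC =====
def Spec_count_redactions (original : String) (redacted : String) (out : Int) : Prop := out = count_redactions_alt original redacted
instance (original : String) (redacted : String) (out : Int) : Decidable (Spec_count_redactions original redacted out) := by unfold Spec_count_redactions; infer_instance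

-- ===== CLAIM (what is proved, stated in full; the proofs are below) =====
def Claim_equal_count_redactions : Prop := ∀ (original : String) (redacted : String), Dom_count_redactions original redacted → Spec_count_redactions original redacted (count_redactions original redacted)

-- ===== LEMMAS AND PROOFS =====

-- the per-marker match predicate, kept un-eta-reduced behind a name
def pvPre (m : List Char) (x : List Char) : Bool := m.isPrefixOf x

theorem pvPre_nil {m : List Char} (h : m ≠ []) : pvPre m [] = false := by
  cases m with
  | nil => exact absurd rfl h
  | cons c t => rfl

-- one step of the tails count
theorem pv_tails_step (p : List Char → Bool) (hnil : p [] = false) (l : List Char) :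
    l.tails.countP p = (if p l then 1 else 0) + (l.drop 1).tails.countP p := by
  cases l with
  | nil => simp [hnil]
  | cons c t =>
    show List.countP p ((c :: t) :: t.tails) = _
    rw [List.countP_cons]
    by_cases h : p (c :: t)
    · simp [h, Nat.add_comm]
    · simp [h]

-- k steps at once when positions 1 .. k-1 cannot match
theorem pv_tails_window (p : List Char → Bool) (hnil : p [] = false) :
    ∀ (k : Nat) (l : List Char), 0 < k →
      (∀ j, 0 < j → j < k → p (l.drop j) = false) →
      l.tails.countP p = (if p l then 1 else 0) + (l.drop k).tails.countP p := by
  intro k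
  induction k with
  | zero => intro l h; omega
  | succ k ih =>
    intro l _ hwin
    rcases Nat.eq_zero_or_pos k with hk | hk
    · subst hk; exact pv_tails_step p hnil l
    · have h1 := ih l hk (fun j hj hjk => hwin j hj (by omega))
      have h2 := pv_tails_step p hnil (l.drop k)
      have h3 : p (l.drop k) = false := hwin k hk (by omega)
      rw [h1, h2, h3, List.drop_drop]
      simp

-- the skipping counter of PySem.Chars.count equals the tails count, for a pattern
-- that cannot overlap itself (no proper suffix of m is a prefix of m)
theorem pv_go_eq (m : List Char) (hm0 : m ≠ [])
    (hself : ∀ j, j < m.length → 0 < j → ¬ (m.drop j <+: m)) :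
    ∀ (fuel : Nat) (l : List Char) (acc : Nat), l.length ≤ fuel →
      PySem.Chars.count.go m fuel l acc = acc + l.tails.countP (pvPre m) := by
  intro fuel
  induction fuel with
  | zero =>
    intro l acc hlen
    have : l = [] := List.eq_nil_of_length_eq_zero (Nat.le_zero.mp hlen)
    subst this
    simp [PySem.Chars.count.go, pvPre_nil hm0]
  | succ f ih =>
    intro l acc hlen
    cases l with
    | nil => simp [PySem.Chars.count.go, pvPre_nil hm0]
    | cons c t =>
      have hmpos : 0 < m.length := List.length_pos_of_ne_nil hm0
      by_cases hpre : m.isPrefixOf (c :: t) = true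
      · have hgo : PySem.Chars.count.go m (f+1) (c::t) acc
            = PySem.Chars.count.go m f ((c::t).drop m.length) (acc+1) := by
          simp [PySem.Chars.count.go, hpre]
        have hP : m <+: (c :: t) := List.isPrefixOf_iff_prefix.mp hpre
        obtain ⟨s, hs⟩ := hP
        have hwin : ∀ j, 0 < j → j < m.length → pvPre m ((c::t).drop j) = false := by
          intro j hj hjm
          by_contra hbad
          have hbad' : m <+: (c::t).drop j :=
            List.isPrefixOf_iff_prefix.mp (by simpa [pvPre] using hbad)
          have hdropeq : (c::t).drop j = m.drop j ++ s := by
            rw [← hs, List.drop_append_of_le_length (by omega)]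
          have hdp : m.drop j <+: (c::t).drop j := ⟨s, hdropeq.symm⟩
          have hlt : (m.drop j).length ≤ m.length := by simp
          exact hself j hjm hj (List.prefix_of_prefix_length_le hdp hbad' hlt)
        have hlen' : ((c::t).drop m.length).length ≤ f := by
          rw [List.length_drop, List.length_cons]
          simp at hlen; omega
        have hpre' : pvPre m (c::t) = true := hpre
        rw [hgo, ih _ _ hlen',
            pv_tails_window (pvPre m) (pvPre_nil hm0) m.length (c::t) hmpos hwin, hpre']
        simp [Nat.add_assoc, Nat.add_comm 1]
      · have hgo : PySem.Chars.count.go m (f+1) (c::t) acc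
            = PySem.Chars.count.go m f t acc := by
          simp [PySem.Chars.count.go, hpre]
        have hlen' : t.length ≤ f := by simp at hlen; omega
        have hpre' : pvPre m (c::t) = false := eq_false_of_ne_true hpre
        rw [hgo, ih _ _ hlen', pv_tails_step (pvPre m) (pvPre_nil hm0) (c::t), hpre']
        simp

theorem pv_count_eq_tails (m l : List Char) (hm0 : m ≠ [])
    (hself : ∀ j, j < m.length → 0 < j → ¬ (m.drop j <+: m)) :
    PySem.Chars.count l m = l.tails.countP (pvPre m) := by
  have hne : m.isEmpty = false := by cases m with
    | nil => exact absurd rfl hm0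
    | cons c t => rfl
  unfold PySem.Chars.count
  rw [hne]
  simpa using pv_go_eq m hm0 hself l.length l 0 (le_refl _)

-- countP of a disjunction of disjoint predicates splits into a sum
theorem pv_countP_or (p q : List Char → Bool) (l : List (List Char))
    (hd : ∀ x ∈ l, ¬ (p x = true ∧ q x = true)) :
    l.countP (fun x => p x || q x) = l.countP p + l.countP q := by
  induction l with
  | nil => simp
  | cons a t ih =>
    have ht := ih (fun x hx => hd x (List.mem_cons_of_mem a hx))
    have ha := hd a (List.mem_cons_self)
    rw [List.countP_cons, List.countP_cons, List.countP_cons, ht]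
    by_cases hp : p a = true <;> by_cases hq : q a = true
    · exact absurd ⟨hp, hq⟩ ha
    all_goals simp [hp, hq] <;> omega

-- sum of per-marker tails counts = tails count of the disjunction, for pairwise
-- prefix-incompatible nonempty markers
theorem pv_sum_tails (L : List (List Char)) (l : List Char)
    (hne : ∀ m ∈ L, m ≠ [])
    (hpw : L.Pairwise (fun m1 m2 => ¬ m1 <+: m2 ∧ ¬ m2 <+: m1)) :
    (L.map (fun m => ((l.tails.countP (pvPre m) : Nat) : Int))).sum
      = ((l.tails.countP (fun x => L.any (fun m => pvPre m x)) : Nat) : Int) := by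
  induction L with
  | nil => simp [pvPre]
  | cons m L' ih =>
    rcases List.pairwise_cons.mp hpw with ⟨hhead, htail⟩
    have hsum := ih (fun m' hm' => hne m' (List.mem_cons_of_mem m hm')) htail
    have hdisj : ∀ x ∈ l.tails,
        ¬ (pvPre m x = true ∧ (L'.any (fun m' => pvPre m' x)) = true) := by
      intro x _ ⟨h1, h2⟩
      rcases List.any_eq_true.mp h2 with ⟨m', hm', h2'⟩
      have hpm : m <+: x := List.isPrefixOf_iff_prefix.mp h1
      have hpm' : m' <+: x := List.isPrefixOf_iff_prefix.mp h2'
      rcases le_total m.length m'.length with hle | hle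
      · exact (hhead m' hm').1 (List.prefix_of_prefix_length_le hpm hpm' hle)
      · exact (hhead m' hm').2 (List.prefix_of_prefix_length_le hpm' hpm hle)
    have hsplit := pv_countP_or (pvPre m)
        (fun x => L'.any (fun m' => pvPre m' x)) l.tails hdisj
    simp only [List.map_cons, List.sum_cons, hsum, List.any_cons]
    rw [hsplit]
    push_cast
    ring

-- counting matching start positions = counting matching tails
theorem pv_range_countP (p : List Char → Bool) (hnil : p [] = false) :
    ∀ (l : List Char),
      (List.range l.length).countP (fun j => p (l.drop j)) = l.tails.countP p := by
  intro l
  induction l with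
  | nil => simp [hnil]
  | cons c t ih =>
    rw [List.length_cons, List.range_succ_eq_map, List.countP_cons, List.countP_map,
        pv_tails_step p hnil (c::t)]
    have h1 : ((fun j => p (List.drop j (c::t))) ∘ Nat.succ) = (fun j => p (List.drop j t)) := rfl
    rw [h1, ih]
    show t.tails.countP p + (if p ((c::t).drop 0) = true then 1 else 0)
        = (if p (c::t) = true then 1 else 0) + ((c::t).drop 1).tails.countP p
    rw [List.drop_zero]
    have h2 : (c::t).drop 1 = t := rfl
    rw [h2]
    omega

-- the ten markers: nonempty, non-self-overlapping, pairwise prefix-incompatible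
theorem pv_markers_ne : ∀ m ∈ pvMarkers, m.toList ≠ [] := by decide

theorem pv_markers_self : ∀ m ∈ pvMarkers,
    ∀ j, j < m.toList.length → 0 < j → ¬ (m.toList.drop j <+: m.toList) := by decide

theorem pv_markers_pair : (pvMarkers.map String.toList).Pairwise
    (fun m1 m2 => ¬ m1 <+: m2 ∧ ¬ m2 <+: m1) := by decide

theorem pv_markers_nil_false :
    (fun x => (pvMarkers.map String.toList).any (fun m => pvPre m x)) ([] : List Char) = false := by
  decide

-- ===== VERDICT (by name: the statement is the Claim_ definition above) =====
theorem count_redactions_spec : Claim_equal_count_redactions := by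
  intro original redacted _
  unfold Spec_count_redactions count_redactions count_redactions_alt
  by_cases hg : PySem.Str.len original = 0 ∨ PySem.Str.len redacted = 0
  · rw [if_pos hg, if_pos hg]
  · rw [if_neg hg, if_neg hg]
    set cs := redacted.toList with hcs
    -- A side: each count is a tails count, and the ten tails counts merge into one
    have hA : (pvMarkers.map (fun m => (PySem.Str.count redacted m : Int))).sum
        = ((pvMarkers.map String.toList).map
            (fun m => ((cs.tails.countP (pvPre m) : Nat) : Int))).sum := by
      rw [List.map_map]
      apply congrArg
      apply List.map_congr_left
      intro m hm
      rw [PySem.Str.count_eq,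
          pv_count_eq_tails m.toList cs (pv_markers_ne m hm) (pv_markers_self m hm)]
      rfl
    rw [hA, pv_sum_tails (pvMarkers.map String.toList) cs
          (by intro m hm; rcases List.mem_map.mp hm with ⟨m', hm', rfl⟩; exact pv_markers_ne m' hm')
          pv_markers_pair]
    -- B side: the fold is a countP over start positions, = the same tails count
    have hlen : PySem.Str.len redacted = (cs.length : Int) := by
      simp [PySem.Str.len, hcs]
    rw [hlen, PySem.List.pyRange_zero_natCast, PySem.List.foldl_if_add_one, List.countP_map]
    have hB : (List.range cs.length).countP
        ((fun i => pvMarkers.any (fun m =>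
            PySem.Chars.startswith (PySem.List.slice redacted.toList (some i) none) m.toList)) ∘
          (fun k : Nat => (k : Int)))
        = (List.range cs.length).countP
            (fun j => (fun x => (pvMarkers.map String.toList).any (fun m => pvPre m x)) (cs.drop j)) := by
      apply List.countP_congr
      intro j _
      simp [Function.comp, PySem.Chars.startswith, pvPre, List.any_map, hcs]
    rw [hB, pv_range_countP (fun x => (pvMarkers.map String.toList).any (fun m => pvPre m x))
          pv_markers_nil_false cs]
    omega
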